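-- pv_equiv track=rewrite | github.com/tddevlin/EPIJudge | epi_judge_python/snake_string.py | snake_string
-- ===== SOURCE A (Python) =====
-- def snake_string(s):
--     top_row = []
--     middle_row = []
--     bottom_row = []
--     for i in range(len(s)):
--         if i % 2 == 0:
--             middle_row.append(s[i])
--         elif (i-1) % 4 == 0:
--             top_row.append(s[i])
--         else:
--             bottom_row.append(s[i])
--     return ''.join(top_row + middle_row + bottom_row)
-- ===== SOURCE B (Python) =====
-- def snake_string(s):
--     return s[1::4] + s[0::2] + s[3::4]
-- ===== Notes on version B (the rewrite author's own statement) =====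
-- stated objective: simpler
-- what changed: Replaces the single indexed loop that mod-branches each character into three accumulator lists by three strided slices s[1::4] + s[0::2] + s[3::4] concatenated directly.
import Mathlib
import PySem

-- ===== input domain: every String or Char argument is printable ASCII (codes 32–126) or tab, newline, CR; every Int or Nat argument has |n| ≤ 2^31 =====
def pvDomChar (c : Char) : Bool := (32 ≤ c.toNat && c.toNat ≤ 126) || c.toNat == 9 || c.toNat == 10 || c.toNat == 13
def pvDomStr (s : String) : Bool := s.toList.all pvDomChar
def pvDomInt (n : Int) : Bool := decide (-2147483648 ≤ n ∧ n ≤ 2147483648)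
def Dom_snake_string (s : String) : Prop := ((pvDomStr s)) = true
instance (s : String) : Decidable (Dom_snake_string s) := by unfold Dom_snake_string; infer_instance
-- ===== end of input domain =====

-- B replaces A's single indexed loop (mod-branching each character into three
-- accumulator lists) by three strided slices s[1::4] + s[0::2] + s[3::4]; objective: simpler.

-- ===== PORT A =====
-- one iteration of A's for-loop body: dispatch s[i] into (top, middle, bottom)
def snakeStep (s : String) (acc : List Char × List Char × List Char) (i : Int) :
    List Char × List Char × List Char :=
  match PySem.Str.pyGet? s i with
  | none => acc  -- unreachable for i ∈ range(len(s)); kept only to stay total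
  | some c =>
    if PySem.Int.mod i 2 = 0 then (acc.1, acc.2.1 ++ [c], acc.2.2)
    else if PySem.Int.mod (i - 1) 4 = 0 then (acc.1 ++ [c], acc.2.1, acc.2.2)
    else (acc.1, acc.2.1, acc.2.2 ++ [c])

def snake_string (s : String) : String :=
  let r := (PySem.List.pyRange 0 (PySem.Str.len s) 1).foldl (snakeStep s) ([], [], [])
  String.ofList (r.1 ++ r.2.1 ++ r.2.2)

-- ===== PORT B =====
def snake_string_alt (s : String) : String :=
  (PySem.Str.slice? s (some 1) none 4).getD "" ++
  (PySem.Str.slice? s (some 0) none 2).getD "" ++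
  (PySem.Str.slice? s (some 3) none 4).getD ""

-- ===== PRECONDITION & SPEC =====
def Spec_snake_string (s : String) (out : String) : Prop := out = snake_string_alt s
instance (s : String) (out : String) : Decidable (Spec_snake_string s out) := by unfold Spec_snake_string; infer_instance

-- ===== CLAIM (what is proved, stated in full; the proofs are below) =====
def Claim_equal_snake_string : Prop := ∀ (s : String), Dom_snake_string s → Spec_snake_string s (snake_string s)

-- ===== LEMMAS AND PROOFS =====

-- every m-th element of a list, starting at its head
def strideN (m : Nat) : List Char → List Char
  | [] => []
  | a :: rest => a :: strideN m (rest.drop (m - 1))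
termination_by l => l.length
decreasing_by
  simp only [List.length_cons, List.length_drop]
  omega

theorem strideN_nil (m : Nat) : strideN m [] = [] := strideN.eq_1 m

theorem strideN_cons (m : Nat) (a : Char) (l : List Char) :
    strideN m (a :: l) = a :: strideN m (l.drop (m - 1)) := strideN.eq_2 m a l

-- Python mod on casts of naturals is Nat mod
theorem pyMod_natCast (k m : Nat) : PySem.Int.mod (k : Int) (m : Int) = ((k % m : Nat) : Int) := by
  unfold PySem.Int.mod
  rw [Int.fmod_eq_emod, if_pos (Or.inl (by positivity))]
  omega

theorem filterMap_range_stride (m : Nat) (hm : 0 < m) :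
    ∀ (n : Nat) (ys : List Char), ys.length ≤ n → ∀ (c : Nat), c = (ys.length + m - 1) / m →
      List.filterMap (fun k => ys[m * k]?) (List.range c) = strideN m ys := by
  intro n
  induction n with
  | zero =>
      intro ys hy c hc
      have hys : ys = [] := List.eq_nil_of_length_eq_zero (by omega)
      subst hys
      have hc0 : c = 0 := by
        rw [hc]; simp only [List.length_nil, Nat.zero_add]
        exact Nat.div_eq_of_lt (by omega)
      rw [hc0]; simp [strideN_nil]
  | succ n ih =>
      intro ys hy c hc
      cases ys with
      | nil =>
          have hc0 : c = 0 := by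
            rw [hc]; simp only [List.length_nil, Nat.zero_add]
            exact Nat.div_eq_of_lt (by omega)
          rw [hc0]; simp [strideN_nil]
      | cons a rest =>
          have hc' : c = rest.length / m + 1 := by
            rw [hc]; simp only [List.length_cons]
            have h2 : rest.length + 1 + m - 1 = rest.length + m := by omega
            rw [h2, Nat.add_div_right _ hm]
          subst hc'
          rw [List.range_succ_eq_map, List.filterMap_cons, List.filterMap_map]
          simp only [Nat.mul_zero, List.getElem?_cons_zero]
          have hrec : List.filterMap ((fun k => (a :: rest)[m * k]?) ∘ Nat.succ)
              (List.range (rest.length / m)) = strideN m (rest.drop (m - 1)) := by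
            have hf : ((fun k => (a :: rest)[m * k]?) ∘ Nat.succ)
                = fun k => (rest.drop (m - 1))[m * k]? := by
              funext k
              simp only [Function.comp]
              rw [List.getElem?_drop]
              have h1 : m * Nat.succ k = (m - 1 + m * k) + 1 := by
                cases m with
                | zero => omega
                | succ m' =>
                    simp only [Nat.succ_eq_add_one, Nat.add_sub_cancel]
                    ring
              rw [h1, List.getElem?_cons_succ]
            rw [hf]
            apply ih
            · have hy' : rest.length + 1 ≤ n + 1 := by simpa using hy
              rw [List.length_drop]; omega
            · rw [List.length_drop]
              rcases Nat.lt_or_ge rest.length (m - 1) with hlt | hge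
              · rw [Nat.div_eq_of_lt (by omega), Nat.div_eq_of_lt (by omega)]
              · congr 1; omega
          rw [hrec, strideN_cons]

theorem slice?_stride (xs : List Char) (r m : Nat) (hm : 0 < m) :
    PySem.List.slice? xs (some (r : Int)) none (m : Int) = some (strideN m (xs.drop r)) := by
  by_cases hr : r < xs.length
  · have hmin : min (r : Int) (xs.length : Int) = (r : Int) :=
      min_eq_left (by exact_mod_cast hr.le)
    simp only [PySem.List.slice?, PySem.List.sliceIndices]
    rw [if_neg (by omega : ¬ (m : Int) = 0)]
    simp only [if_neg (show ¬ ((m : Int) < 0) by omega),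
      if_neg (show ¬ ((r : Int) < 0) by omega), hmin]
    rw [if_pos (by omega : (0:Int) < (m:Int)),
      if_pos (by exact_mod_cast hr : ((r:Int) < (xs.length : Int)))]
    have hcount : (((xs.length : Int) - r + m - 1) / m).toNat = ((xs.length - r) + m - 1) / m := by
      have h1 : ((xs.length : Int) - r + m - 1) = (((xs.length - r) + m - 1 : Nat) : Int) := by
        omega
      rw [h1, ← Int.natCast_div, Int.toNat_natCast]
    rw [hcount]
    have hfun : (fun k : Nat => xs[((r : Int) + m * k).toNat]?)
        = fun k : Nat => (xs.drop r)[m * k]? := by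
      funext k
      rw [List.getElem?_drop]
      have h2 : ((r : Int) + m * k) = ((r + m * k : Nat) : Int) := by push_cast; ring
      rw [h2, Int.toNat_natCast]
    rw [hfun]
    exact congrArg some (filterMap_range_stride m hm (xs.drop r).length _ le_rfl _
      (by rw [List.length_drop]))
  · have hdrop : xs.drop r = [] := List.drop_eq_nil_of_le (by omega)
    have hmin : min (r : Int) (xs.length : Int) = (xs.length : Int) :=
      min_eq_right (by exact_mod_cast Nat.le_of_not_lt hr)
    simp only [PySem.List.slice?, PySem.List.sliceIndices]
    rw [if_neg (by omega : ¬ (m : Int) = 0)]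
    simp only [if_neg (show ¬ ((m : Int) < 0) by omega),
      if_neg (show ¬ ((r : Int) < 0) by omega), hmin]
    rw [if_pos (by omega : (0:Int) < (m:Int)),
      if_neg (by omega : ¬ ((xs.length : Int) < (xs.length : Int)))]
    simp [hdrop, strideN_nil]

theorem pyRange_one_nil (a b : Int) (h : ¬ a < b) : PySem.List.pyRange a b 1 = [] := by
  simp [PySem.List.pyRange, h]

theorem step_mid (s : String) (k : Nat) (c : Char) (h : s.toList[k]? = some c)
    (h2 : k % 2 = 0) (T M B : List Char) :
    snakeStep s (T, M, B) (k : Int) = (T, M ++ [c], B) := by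
  unfold snakeStep
  rw [PySem.Str.pyGet?_natCast, h]
  dsimp only
  rw [if_pos (by rw [show (2:Int) = ((2:Nat):Int) by norm_cast, pyMod_natCast]; omega)]

theorem step_top (s : String) (k : Nat) (c : Char) (h : s.toList[k]? = some c)
    (h4 : k % 4 = 1) (T M B : List Char) :
    snakeStep s (T, M, B) (k : Int) = (T ++ [c], M, B) := by
  unfold snakeStep
  rw [PySem.Str.pyGet?_natCast, h]
  dsimp only
  rw [if_neg (by rw [show (2:Int) = ((2:Nat):Int) by norm_cast, pyMod_natCast]; omega)]
  rw [if_pos (by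
    have hk1 : ((k : Int) - 1) = ((k - 1 : Nat) : Int) := by push_cast [Nat.cast_sub (by omega : 1 ≤ k)]; ring
    rw [hk1, show (4:Int) = ((4:Nat):Int) by norm_cast, pyMod_natCast]; omega)]

theorem step_bot (s : String) (k : Nat) (c : Char) (h : s.toList[k]? = some c)
    (h4 : k % 4 = 3) (T M B : List Char) :
    snakeStep s (T, M, B) (k : Int) = (T, M, B ++ [c]) := by
  unfold snakeStep
  rw [PySem.Str.pyGet?_natCast, h]
  dsimp only
  rw [if_neg (by rw [show (2:Int) = ((2:Nat):Int) by norm_cast, pyMod_natCast]; omega)]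
  rw [if_neg (by
    have hk1 : ((k : Int) - 1) = ((k - 1 : Nat) : Int) := by push_cast [Nat.cast_sub (by omega : 1 ≤ k)]; ring
    rw [hk1, show (4:Int) = ((4:Nat):Int) by norm_cast, pyMod_natCast]; omega)]

-- A's loop over range(k, n) with k ≡ 0 (mod 4) appends exactly the three strides of drop k
theorem foldl_snake (s : String) :
    ∀ (n : Nat) (rest : List Char), rest.length ≤ n → ∀ (k : Nat), k % 4 = 0 →
      s.toList.drop k = rest → ∀ (T M B : List Char),
      (PySem.List.pyRange (k : Int) (s.toList.length : Int) 1).foldl (snakeStep s) (T, M, B)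
        = (T ++ strideN 4 (rest.drop 1), M ++ strideN 2 rest, B ++ strideN 4 (rest.drop 3)) := by
  intro n
  induction n with
  | zero =>
      intro rest h0 k hk hdrop T M B
      have hrest : rest = [] := List.eq_nil_of_length_eq_zero (by omega)
      subst hrest
      have hke : s.toList.length - k = 0 := by
        have := List.length_drop (l := s.toList) (i := k); rw [hdrop] at this; simpa using this.symm
      rw [pyRange_one_nil _ _ (by exact_mod_cast (by omega : ¬ k < s.toList.length))]
      simp [strideN_nil]
  | succ n ih =>
      intro rest hlen k hk hdrop T M B
      cases rest with
      | nil =>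
          have hke : s.toList.length - k = 0 := by
            have := List.length_drop (l := s.toList) (i := k); rw [hdrop] at this; simpa using this.symm
          rw [pyRange_one_nil _ _ (by exact_mod_cast (by omega : ¬ k < s.toList.length))]
          simp [strideN_nil]
      | cons a rest1 =>
          have hlen_eq : s.toList.length = k + (a :: rest1).length := by
            have h1 := List.length_drop (l := s.toList) (i := k)
            rw [hdrop] at h1
            have h2 : k ≤ s.toList.length := by
              by_contra hc
              have : s.toList.drop k = [] := List.drop_eq_nil_of_le (by omega)
              rw [hdrop] at this; exact List.cons_ne_nil a rest1 this
            omega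
          have hget : ∀ (j : Nat) (x : Char), (a :: rest1)[j]? = some x → s.toList[k + j]? = some x := by
            intro j x hx
            have := List.getElem?_drop (xs := s.toList) (i := k) (j := j)
            rw [hdrop, hx] at this; exact this.symm
          have e0 : s.toList[k]? = some a := by
            have := hget 0 a (by simp); simpa using this
          have hk0 : (k : Int) < (s.toList.length : Int) := by
            simp only [List.length_cons] at hlen_eq; exact_mod_cast (by omega : k < s.toList.length)
          rw [PySem.List.pyRange_one_cons hk0, List.foldl_cons,
            step_mid s k a e0 (by omega) T M B]
          have c1 : ((k : Int) + 1) = ((k + 1 : Nat) : Int) := by push_cast; ring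
          rw [c1]
          cases rest1 with
          | nil =>
              rw [pyRange_one_nil _ _ (by simp only [List.length_cons, List.length_nil] at hlen_eq; exact_mod_cast (by omega : ¬ k + 1 < s.toList.length))]
              simp [strideN_nil, strideN_cons]
          | cons b rest2 =>
              have e1 : s.toList[k + 1]? = some b := hget 1 b (by simp)
              have hk1 : ((k + 1 : Nat) : Int) < (s.toList.length : Int) := by
                simp only [List.length_cons] at hlen_eq; exact_mod_cast (by omega : k + 1 < s.toList.length)
              rw [PySem.List.pyRange_one_cons hk1, List.foldl_cons,
                step_top s (k + 1) b e1 (by omega) _ _ _]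
              have c2 : (((k + 1 : Nat) : Int) + 1) = ((k + 2 : Nat) : Int) := by push_cast; ring
              rw [c2]
              cases rest2 with
              | nil =>
                  rw [pyRange_one_nil _ _ (by simp only [List.length_cons, List.length_nil] at hlen_eq; exact_mod_cast (by omega : ¬ k + 2 < s.toList.length))]
                  simp [strideN_nil, strideN_cons]
              | cons c rest3 =>
                  have e2 : s.toList[k + 2]? = some c := hget 2 c (by simp)
                  have hk2 : ((k + 2 : Nat) : Int) < (s.toList.length : Int) := by
                    simp only [List.length_cons] at hlen_eq; exact_mod_cast (by omega : k + 2 < s.toList.length)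
                  rw [PySem.List.pyRange_one_cons hk2, List.foldl_cons,
                    step_mid s (k + 2) c e2 (by omega) _ _ _]
                  have c3 : (((k + 2 : Nat) : Int) + 1) = ((k + 3 : Nat) : Int) := by push_cast; ring
                  rw [c3]
                  cases rest3 with
                  | nil =>
                      rw [pyRange_one_nil _ _ (by simp only [List.length_cons, List.length_nil] at hlen_eq; exact_mod_cast (by omega : ¬ k + 3 < s.toList.length))]
                      simp [strideN_nil, strideN_cons]
                  | cons d rest4 =>
                      have e3 : s.toList[k + 3]? = some d := hget 3 d (by simp)
                      have hk3 : ((k + 3 : Nat) : Int) < (s.toList.length : Int) := by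
                        simp only [List.length_cons] at hlen_eq; exact_mod_cast (by omega : k + 3 < s.toList.length)
                      rw [PySem.List.pyRange_one_cons hk3, List.foldl_cons,
                        step_bot s (k + 3) d e3 (by omega) _ _ _]
                      have c4 : (((k + 3 : Nat) : Int) + 1) = ((k + 4 : Nat) : Int) := by push_cast; ring
                      rw [c4]
                      have hdrop4 : s.toList.drop (k + 4) = rest4 := by
                        have := List.drop_drop (l := s.toList) (j := k) (i := 4)
                        rw [hdrop] at this; simpa using this.symm
                      rw [ih rest4 (by simp only [List.length_cons] at hlen; omega) (k + 4)
                        (by omega) hdrop4 _ _ _]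
                      simp [strideN_cons, List.append_assoc]

theorem main_eq (s : String) : snake_string s = snake_string_alt s := by
  unfold snake_string snake_string_alt
  have hlen : PySem.Str.len s = (s.toList.length : Int) := rfl
  have H := foldl_snake s s.toList.length s.toList le_rfl 0 (by omega) (by simp) [] [] []
  rw [show (((0 : Nat) : Int)) = (0 : Int) from rfl] at H
  rw [hlen, H]
  simp only [List.nil_append]
  have b1 : PySem.Str.slice? s (some 1) none 4 = some (String.ofList (strideN 4 (s.toList.drop 1))) := by
    unfold PySem.Str.slice? PySem.Chars.slice?
    rw [show (1 : Int) = ((1 : Nat) : Int) by norm_cast, show (4 : Int) = ((4 : Nat) : Int) by norm_cast,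
      slice?_stride s.toList 1 4 (by omega)]
    rfl
  have b2 : PySem.Str.slice? s (some 0) none 2 = some (String.ofList (strideN 2 s.toList)) := by
    unfold PySem.Str.slice? PySem.Chars.slice?
    rw [show (0 : Int) = ((0 : Nat) : Int) by norm_cast, show (2 : Int) = ((2 : Nat) : Int) by norm_cast,
      slice?_stride s.toList 0 2 (by omega)]
    rfl
  have b3 : PySem.Str.slice? s (some 3) none 4 = some (String.ofList (strideN 4 (s.toList.drop 3))) := by
    unfold PySem.Str.slice? PySem.Chars.slice?
    rw [show (3 : Int) = ((3 : Nat) : Int) by norm_cast, show (4 : Int) = ((4 : Nat) : Int) by norm_cast,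
      slice?_stride s.toList 3 4 (by omega)]
    rfl
  rw [b1, b2, b3]
  simp only [Option.getD_some]
  apply String.toList_injective
  simp [String.toList_append, String.toList_ofList]

-- ===== VERDICT (by name: the statement is the Claim_ definition above) =====
theorem snake_string_spec : Claim_equal_snake_string := by
  intro s _
  unfold Spec_snake_string
  exact main_eq s
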